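-- pv_equiv track=rewrite | github.com/RHEcosystemAppEng/sast-ai-workflow | src/report_readers/sarif_reader.py | _should_skip_by_kinds
-- ===== SOURCE A (Python) =====
-- from typing import Any, Dict, List
--
-- def _should_skip_by_kinds(kinds: List[str]) -> bool:
--     """
--     Determine if location should be skipped based on SARIF kinds.
--
--     Keep: vulnerability-semantic kinds (memory, resource, taint, danger)
--     Skip: control-flow kinds (branch, enter, exit, true, false)
--     """
--     if not kinds:
--         return False
--
--     # Important kinds to keep (vulnerability-related)
--     important_kinds = {
--         "acquire",
--         "release",  # Resource management
--         "memory",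
--         "resource",  # Memory/resource operations
--         "taint",  # Taint analysis
--         "danger",
--         "caution",  # Security warnings
--         "lock",  # Synchronization
--         "value",  # Value tracking (assignments)
--         "scope",  # Variable scope (may indicate leaks)
--     }
--
--     # Control flow kinds to skip
--     control_flow_kinds = {
--         "branch",
--         "true",
--         "false",  # Branch decisions
--         "enter",
--         "exit",  # Scope entry/exit
--         "implicit",  # Implicit control flow
--         "unreachable",  # Unreachable code
--     }
--
--     # If any important kind is present, keep the location
--     if any(kind in important_kinds for kind in kinds):
--         return False
--
--     # If only control flow kinds are present, skip
--     if any(kind in control_flow_kinds for kind in kinds):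
--         return True
--
--     # For unknown kinds or 'call'/'return', use conservative approach
--     # Keep 'call'/'return' as they might indicate important function calls
--     return False
-- ===== SOURCE B (Python) =====
-- from typing import Any, Dict, List
--
-- def _should_skip_by_kinds(kinds: List[str]) -> bool:
--     important_kinds = {
--         "acquire", "release", "memory", "resource", "taint",
--         "danger", "caution", "lock", "value", "scope",
--     }
--     control_flow_kinds = {
--         "branch", "true", "false", "enter", "exit",
--         "implicit", "unreachable",
--     }
--     saw_control = False
--     for kind in kinds:
--         if kind in important_kinds:
--             return False
--         if kind in control_flow_kinds:
--             saw_control = True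
--     return saw_control
-- ===== Notes on version B (the rewrite author's own statement) =====
-- stated objective: simpler
-- what changed: Two sequential any() scans over the whole list are replaced by a single pass carrying a saw_control flag, returning False immediately on an important kind; the empty-list guard falls out of the loop.
import Mathlib
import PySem

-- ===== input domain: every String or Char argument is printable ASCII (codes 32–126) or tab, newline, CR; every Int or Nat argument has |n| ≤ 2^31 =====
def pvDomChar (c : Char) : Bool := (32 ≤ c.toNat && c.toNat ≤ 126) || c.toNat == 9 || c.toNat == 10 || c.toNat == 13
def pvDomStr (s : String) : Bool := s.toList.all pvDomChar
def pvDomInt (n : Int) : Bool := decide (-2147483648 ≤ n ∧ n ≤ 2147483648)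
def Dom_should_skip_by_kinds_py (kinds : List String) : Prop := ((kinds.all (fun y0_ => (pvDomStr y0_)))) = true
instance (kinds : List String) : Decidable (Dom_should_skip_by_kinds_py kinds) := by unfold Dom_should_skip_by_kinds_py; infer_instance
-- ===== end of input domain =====

-- B replaces A's two sequential any() scans with a single flag-carrying pass (early return on important kinds); objective: simpler.


-- ===== PORT A =====
def importantKinds : PySem.Set String :=
  PySem.Set.ofList ["acquire", "release", "memory", "resource", "taint",
    "danger", "caution", "lock", "value", "scope"]

def controlFlowKinds : PySem.Set String :=
  PySem.Set.ofList ["branch", "true", "false", "enter", "exit",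
    "implicit", "unreachable"]

-- A: empty guard, then two any() scans in sequence
def should_skip_by_kinds_py (kinds : List String) : Bool :=
  if kinds.isEmpty then false
  else if kinds.any (fun kind => importantKinds.contains kind) then false
  else if kinds.any (fun kind => controlFlowKinds.contains kind) then true
  else false

-- ===== PORT B =====
-- B: single pass; early return False on an important kind, otherwise accumulate saw_control
def altLoop (kinds : List String) (sawControl : Bool) : Bool :=
  match kinds with
  | [] => sawControl
  | kind :: rest =>
    if importantKinds.contains kind then false
    else altLoop rest (sawControl || controlFlowKinds.contains kind)

def should_skip_by_kinds_py_alt (kinds : List String) : Bool :=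
  altLoop kinds false

-- ===== PRECONDITION & SPEC =====
def Spec_should_skip_by_kinds_py (kinds : List String) (out : Bool) : Prop := out = should_skip_by_kinds_py_alt kinds
instance (kinds : List String) (out : Bool) : Decidable (Spec_should_skip_by_kinds_py kinds out) := by unfold Spec_should_skip_by_kinds_py; infer_instance

-- ===== CLAIM (what is proved, stated in full; the proofs are below) =====
def Claim_equal_should_skip_by_kinds_py : Prop := ∀ (kinds : List String), Dom_should_skip_by_kinds_py kinds → Spec_should_skip_by_kinds_py kinds (should_skip_by_kinds_py kinds)

-- ===== LEMMAS AND PROOFS =====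
theorem altLoop_char (kinds : List String) (saw : Bool) :
    altLoop kinds saw =
      if kinds.any (fun k => importantKinds.contains k) then false
      else (saw || kinds.any (fun k => controlFlowKinds.contains k)) := by
  induction kinds generalizing saw with
  | nil => simp [altLoop]
  | cons k rest ih =>
    by_cases hi : importantKinds.contains k = true
    · have hi2 : k ∈ importantKinds := by simpa using hi
      simp [altLoop, List.any_cons, hi2]
    · have hi' : importantKinds.contains k = false := by rwa [Bool.not_eq_true] at hi
      simp only [altLoop, hi', Bool.false_eq_true, if_false, ih, List.any_cons,
        Bool.false_or, Bool.or_assoc]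

-- ===== VERDICT (by name: the statement is the Claim_ definition above) =====
theorem should_skip_by_kinds_py_spec : Claim_equal_should_skip_by_kinds_py := by
  intro kinds _
  unfold Spec_should_skip_by_kinds_py should_skip_by_kinds_py should_skip_by_kinds_py_alt
  rw [altLoop_char]
  cases kinds with
  | nil => rfl
  | cons k rest =>
    simp only [List.isEmpty_cons, Bool.false_eq_true, if_false]
    cases h1 : ((k :: rest).any fun kind => importantKinds.contains kind) <;>
      cases h2 : ((k :: rest).any fun kind => controlFlowKinds.contains kind) <;>
      simp
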